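-- pv_equiv track=rewrite | github.com/Aasthaengg/IBMdataset | Python_codes/p02781/s538101435.py | neq
-- ===== SOURCE A (Python) =====
-- def neq(n):
--     r = 0
--     for i in range(10**(len(str(n))-1),n+1):
--         ml = 1
--         for j in range(len(str(n))):
--             ml *= int(str(i)[j])
--         if ml != 0:
--             r += 1
--     return(r)
-- ===== SOURCE B (Python) =====
-- def _nz(m):
--     # all decimal digits of m are nonzero (m >= 1; _nz(0) vacuously True)
--     if m == 0:
--         return True
--     return m % 10 != 0 and _nz(m // 10)
--
--
-- def _g(m):
--     # number of k in [1..m] whose decimal digits are all nonzero,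
--     # by recursion on the last digit: for m >= 10 with q, r = divmod(m, 10),
--     # the all-nonzero k <= m are 1..9, then 10*a+b with 1 <= a <= q-1 (9 choices
--     # of b each) and a = q with 1 <= b <= r.
--     if m < 10:
--         return max(m, 0)
--     q, r = divmod(m, 10)
--     return 9 + 9 * _g(q - 1) + (r if _nz(q) else 0)
--
--
-- def neq(n):
--     if n < 1:
--         return 0
--     lo = 10 ** (len(str(n)) - 1)
--     return _g(n) - _g(lo - 1)
-- ===== Notes on version B (the rewrite author's own statement) =====
-- stated objective: faster
-- what changed: Replaced the brute-force scan of every d-digit number up to n (testing each via a string digit product) with a closed-form last-digit recurrence g(m) counting all-nonzero-digit numbers in [1..m] arithmetically, returning g(n) - g(10^(d-1)-1).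
import Mathlib
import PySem

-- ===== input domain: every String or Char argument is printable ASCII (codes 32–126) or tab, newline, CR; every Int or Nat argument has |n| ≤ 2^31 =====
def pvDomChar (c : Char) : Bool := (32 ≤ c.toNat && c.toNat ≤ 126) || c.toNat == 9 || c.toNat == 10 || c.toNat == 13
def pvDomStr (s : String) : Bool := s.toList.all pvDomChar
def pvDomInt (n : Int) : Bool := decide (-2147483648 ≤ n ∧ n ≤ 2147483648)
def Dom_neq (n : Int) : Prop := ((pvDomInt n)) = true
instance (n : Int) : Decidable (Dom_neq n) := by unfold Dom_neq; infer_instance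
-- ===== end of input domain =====

-- B replaces A's brute-force scan of all d-digit numbers up to n (string digit product per number)
-- with an arithmetic last-digit counting recurrence; equivalence of the return values is proved below.

-- ===== PORT A =====
-- literal transliteration of A: r = 0; for i in range(10**(len(str(n))-1), n+1):
--   ml = 1; for j in range(len(str(n))): ml *= int(str(i)[j]); if ml != 0: r += 1
-- int(str(i)[j]): str(i)[j] raises IndexError when j is out of range; the `none` branch (value 0)
-- is unreachable on every input (each i in the range has exactly len(str(n)) digits), so A is total.
def neq (n : Int) : Int :=
  let d : Int := PySem.Str.len (PySem.Int.toStr n)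
  -- 10 ** (len(str(n)) - 1): the exponent d - 1 is ≥ 0 since str(n) is nonempty, so Nat power is exact
  let lo : Int := (10 : Int) ^ (d - 1).toNat
  (PySem.List.pyRange lo (n + 1) 1).foldl
    (fun r i =>
      let ml : Int :=
        (PySem.List.pyRange 0 d 1).foldl
          (fun ml j =>
            ml * (match PySem.Str.pyGet? (PySem.Int.toStr i) j with
                  | none => 0
                  | some c => (PySem.Int.ofChars? [c]).getD 0)) 1
      if ml ≠ 0 then r + 1 else r) 0

-- ===== PORT B =====
-- _nz(m): all decimal digits of m are nonzero (recursion on m // 10).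
-- The `m ≤ 0` guard is a totality guard only: Python's _nz is called with m ≥ 0 and _nz(0) = True.
def nzB (m : Int) : Bool :=
  if m ≤ 0 then true
  else decide (PySem.Int.mod m 10 ≠ 0) && nzB (PySem.Int.floordiv m 10)
termination_by m.toNat
decreasing_by
  have h10 : PySem.Int.floordiv m 10 = m / 10 := PySem.Int.floordiv_eq_ediv_of_pos (by omega)
  rw [h10]; omega

-- _g(m): if m < 10: return max(m, 0); q, r = divmod(m, 10); return 9 + 9*_g(q-1) + (r if _nz(q) else 0)
def gB (m : Int) : Int :=
  if h : m < 10 then max m 0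
  else
    9 + 9 * gB (PySem.Int.floordiv m 10 - 1) +
      (if nzB (PySem.Int.floordiv m 10) then PySem.Int.mod m 10 else 0)
termination_by m.toNat
decreasing_by
  have h10 : PySem.Int.floordiv m 10 = m / 10 := PySem.Int.floordiv_eq_ediv_of_pos (by omega)
  rw [h10]; omega

def neq_alt (n : Int) : Int :=
  if n < 1 then 0
  else
    -- lo = 10 ** (len(str(n)) - 1)  (exponent ≥ 0 as in port A)
    let lo : Int := (10 : Int) ^ ((PySem.Str.len (PySem.Int.toStr n)) - 1).toNat
    gB n - gB (lo - 1)

-- ===== PRECONDITION & SPEC =====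
def Spec_neq (n : Int) (out : Int) : Prop := out = neq_alt n
instance (n : Int) (out : Int) : Decidable (Spec_neq n out) := by unfold Spec_neq; infer_instance

-- ===== CLAIM (what is proved, stated in full; the proofs are below) =====
def Claim_equal_neq : Prop := ∀ (n : Int), Dom_neq n → Spec_neq n (neq n)

-- ===== LEMMAS AND PROOFS =====

-- proof-side Nat versions of B's helpers
def nzN (m : Nat) : Bool :=
  if m = 0 then true else decide (m % 10 ≠ 0) && nzN (m / 10)
decreasing_by omega

def gN (m : Nat) : Nat :=
  if m < 10 then m
  else 9 + 9 * gN (m / 10 - 1) + (if nzN (m / 10) then m % 10 else 0)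
decreasing_by omega

-- cN m = number of k in [1..m] with all digits nonzero
def cN : Nat → Nat
  | 0 => 0
  | m + 1 => cN m + (if nzN (m + 1) then 1 else 0)

-- B's Int helpers compute the Nat versions
theorem nzB_natCast (m : Nat) : nzB (m : Int) = nzN m := by
  induction m using Nat.strong_induction_on with
  | _ m IH =>
    rw [nzB, nzN]
    by_cases h0 : m = 0
    · subst h0; simp
    · have h1 : ¬ ((m : Int) ≤ 0) := by exact_mod_cast not_le.mpr (by omega : (0:Int) < m)
      rw [if_neg h1, if_neg h0]
      have hmod : PySem.Int.mod (m : Int) 10 = ((m % 10 : Nat) : Int) := by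
        exact_mod_cast PySem.Int.mod_natCast m 10
      have hdiv : PySem.Int.floordiv (m : Int) 10 = ((m / 10 : Nat) : Int) := by
        exact_mod_cast PySem.Int.floordiv_natCast m 10
      rw [hmod, hdiv, IH (m / 10) (by omega)]
      by_cases hm10 : m % 10 = 0
      · simp [hm10]
      · simp [hm10]; exact fun _ => by omega

theorem gB_natCast (m : Nat) : gB (m : Int) = (gN m : Int) := by
  induction m using Nat.strong_induction_on with
  | _ m IH =>
    rw [gB, gN]
    have hmod : PySem.Int.mod (m : Int) 10 = ((m % 10 : Nat) : Int) := by
      exact_mod_cast PySem.Int.mod_natCast m 10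
    have hdiv : PySem.Int.floordiv (m : Int) 10 = ((m / 10 : Nat) : Int) := by
      exact_mod_cast PySem.Int.floordiv_natCast m 10
    by_cases h0 : m < 10
    · rw [dif_pos (by exact_mod_cast h0), if_pos h0]
      omega
    · rw [dif_neg (by exact_mod_cast h0), if_neg h0, hmod, hdiv]
      have hq : ((m / 10 : Nat) : Int) - 1 = ((m / 10 - 1 : Nat) : Int) := by omega
      rw [hq, IH (m / 10 - 1) (by omega), nzB_natCast]
      by_cases hnz : nzN (m / 10) <;> simp [hnz]

-- nzN reads 0-freeness of the digit list
theorem nzN_iff (m : Nat) : nzN m = true ↔ 0 ∉ Nat.digits 10 m := by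
  induction m using Nat.strong_induction_on with
  | _ m IH =>
    rw [nzN]
    by_cases h0 : m = 0
    · subst h0; simp
    · rw [if_neg h0, Nat.digits_def' (by norm_num) (Nat.pos_of_ne_zero h0)]
      simp only [List.mem_cons, Bool.and_eq_true, decide_eq_true_eq,
        IH (m / 10) (by omega), eq_comm (a := (0 : Nat))]
      tauto

-- core's toDigits is the reversed digit list rendered with digitChar
theorem toDigitsCore_eq (f : Nat) : ∀ (m : Nat) (acc : List Char), m ≠ 0 → m < f →
    Nat.toDigitsCore 10 f m acc = (Nat.digits 10 m).reverse.map Nat.digitChar ++ acc := by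
  induction f with
  | zero => intro m acc h0 h; omega
  | succ f IH =>
    intro m acc h0 hlt
    by_cases hq : m / 10 = 0
    · have h9 : m < 10 := by omega
      show (if m / 10 = 0 then (m % 10).digitChar :: acc
            else Nat.toDigitsCore 10 f (m / 10) ((m % 10).digitChar :: acc))
          = (Nat.digits 10 m).reverse.map Nat.digitChar ++ acc
      rw [if_pos hq, Nat.digits_def' (by norm_num) (Nat.pos_of_ne_zero h0), hq]
      simp
    · have h2 : m / 10 < f := by omega
      show (if m / 10 = 0 then (m % 10).digitChar :: acc
            else Nat.toDigitsCore 10 f (m / 10) ((m % 10).digitChar :: acc))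
          = (Nat.digits 10 m).reverse.map Nat.digitChar ++ acc
      rw [if_neg hq, IH (m / 10) ((m % 10).digitChar :: acc) hq h2,
        Nat.digits_def' (by norm_num) (Nat.pos_of_ne_zero h0)]
      simp

theorem toDigits_eq (m : Nat) (hm : m ≠ 0) :
    Nat.toDigits 10 m = (Nat.digits 10 m).reverse.map Nat.digitChar := by
  have := toDigitsCore_eq (m + 1) m [] hm (by omega)
  simpa [Nat.toDigits] using this

theorem toChars_natCast (m : Nat) (hm : m ≠ 0) :
    PySem.Int.toChars (m : Int) = (Nat.digits 10 m).reverse.map Nat.digitChar := by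
  rw [show PySem.Int.toChars (m : Int) = Nat.toDigits 10 m by
    simp [PySem.Int.toChars, Int.not_lt.mpr (Int.natCast_nonneg m)]]
  exact toDigits_eq m hm

-- int(c) for a digit char
theorem ofChars_digitChar (x : Nat) (hx : x < 10) :
    (PySem.Int.ofChars? [Nat.digitChar x]).getD 0 = (x : Int) := by
  interval_cases x <;> decide

-- folding index-lookup multiplication over range = product of the mapped list
theorem foldl_range_getElem_prod (l : List Char) (g : Char → Int) : ∀ init : Int,
    (List.range l.length).foldl
      (fun ml k => ml * (match l[k]? with | none => 0 | some c => g c)) init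
    = init * (l.map g).prod := by
  induction l using List.reverseRecOn with
  | nil => simp
  | append_singleton l c IH =>
    intro init
    rw [List.length_append, List.length_singleton, List.range_succ, List.foldl_append]
    have hcongr : (List.range l.length).foldl
        (fun ml k => ml * (match (l ++ [c])[k]? with | none => 0 | some c => g c)) init
        = (List.range l.length).foldl
        (fun ml k => ml * (match l[k]? with | none => 0 | some c => g c)) init := by
      refine PySem.List.foldl_congr_mem _ _ _ _ ?_
      intro acc k hk
      rw [List.getElem?_append_left (List.mem_range.mp hk)]
    rw [hcongr, IH]
    simp [List.getElem?_concat_length]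
    ring

-- the inner loop of A computes the product of the decimal digits of i
theorem inner_prod (i : Nat) (hi : i ≠ 0) (D : Nat) (hD : (Nat.digits 10 i).length = D) :
    (PySem.List.pyRange 0 (D : Int) 1).foldl
      (fun ml j =>
        ml * (match PySem.Str.pyGet? (PySem.Int.toStr (i : Int)) j with
              | none => 0
              | some c => (PySem.Int.ofChars? [c]).getD 0)) 1
    = ((Nat.digits 10 i).prod : Int) := by
  have hs : (PySem.Int.toStr (i : Int)).toList = (Nat.digits 10 i).reverse.map Nat.digitChar := by
    rw [PySem.Int.toStr, String.toList_ofList, toChars_natCast i hi]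
  set cs : List Char := (Nat.digits 10 i).reverse.map Nat.digitChar with hcs
  have hlen : cs.length = D := by simp [hcs, hD]
  rw [PySem.List.pyRange_one]
  rw [show ((D : Int) - 0).toNat = D by omega]
  rw [List.foldl_map]
  have hcongr : (List.range D).foldl
      (fun (ml : Int) (k : Nat) => ml * (match PySem.Str.pyGet? (PySem.Int.toStr (i : Int)) (0 + (k : Int)) with
                         | none => 0
                         | some c => (PySem.Int.ofChars? [c]).getD 0)) 1
      = (List.range D).foldl
      (fun (ml : Int) (k : Nat) => ml * (match cs[k]? with
                         | none => 0
                         | some c => (PySem.Int.ofChars? [c]).getD 0)) 1 := by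
    refine PySem.List.foldl_congr_mem _ _ _ _ ?_
    intro acc k hk
    have : PySem.Str.pyGet? (PySem.Int.toStr (i : Int)) (0 + (k : Int)) = cs[k]? := by
      rw [zero_add]
      simp [hs]
    rw [this]
  rw [hcongr, ← hlen, foldl_range_getElem_prod, one_mul]
  have hmap : cs.map (fun c => (PySem.Int.ofChars? [c]).getD 0)
      = (Nat.digits 10 i).reverse.map (Nat.cast : Nat → Int) := by
    rw [hcs, List.map_map]
    refine List.map_congr_left ?_
    intro x hx
    have hx10 : x < 10 := Nat.digits_lt_base (by norm_num) (List.mem_reverse.mp hx)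
    exact ofChars_digitChar x hx10
  rw [hmap, ← Nat.cast_list_prod, List.prod_reverse]

-- gN counts what cN counts
theorem cN_succ_sub (m : Nat) : cN (m + 1) = cN m + (if nzN (m + 1) then 1 else 0) := rfl

theorem nzN_step (m : Nat) (h0 : m ≠ 0) :
    nzN m = (decide (m % 10 ≠ 0) && nzN (m / 10)) := by
  rw [nzN, if_neg h0]

theorem nzN_zero : nzN 0 = true := by rw [nzN]; norm_num

theorem nzN_small (m : Nat) (h0 : m ≠ 0) (h9 : m < 10) : nzN m = true := by
  rw [nzN_step m h0, Nat.div_eq_of_lt h9, Nat.mod_eq_of_lt h9, nzN_zero]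
  simp [h0]

theorem cN_small (m : Nat) (h : m < 10) : cN m = m := by
  induction m with
  | zero => rfl
  | succ k IHk =>
    rw [cN_succ_sub, IHk (by omega), nzN_small (k + 1) (by omega) h]
    simp

theorem gN_eq_cN (m : Nat) : gN m = cN m := by
  induction m using Nat.strong_induction_on with
  | _ m IH =>
    by_cases h9 : m < 10
    · rw [gN, if_pos h9, cN_small m h9]
    · -- m ≥ 10
      have h0 : m ≠ 0 := by omega
      have hm1 : m = (m - 1) + 1 := by omega
      have hcN : cN m = cN (m - 1) + (if nzN m then 1 else 0) := by
        rw [hm1]; rfl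
      by_cases hr : m % 10 = 0
      · -- last digit zero: the count does not move
        have hnzm : nzN m = false := by
          rw [nzN_step m h0]; simp [hr]
        by_cases h20 : m < 20
        · -- m = 10 exactly
          have hm10 : m = 10 := by omega
          subst hm10
          have g0 : gN 0 = 0 := by rw [gN]; norm_num
          have e1 : gN 10 = 9 := by
            rw [gN]
            norm_num [g0]
          have c9 : cN 9 = 9 := cN_small 9 (by omega)
          rw [e1, show (10 : Nat) = 9 + 1 from rfl, cN_succ_sub, c9, hnzm]
          simp
        · -- m ≥ 20, q = m / 10 ≥ 2
          have hq2 : 2 ≤ m / 10 := by omega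
          have e1 : gN m = 9 + 9 * gN (m / 10 - 1) := by
            rw [gN, if_neg h9]
            by_cases hz : nzN (m / 10) <;> simp [hz, hr]
          have hd1 : (m - 1) / 10 = m / 10 - 1 := by omega
          have hd2 : (m - 1) % 10 = 9 := by omega
          have e2 : gN (m - 1) = 9 + 9 * gN (m / 10 - 2) +
              (if nzN (m / 10 - 1) then 9 else 0) := by
            rw [gN, if_neg (by omega), hd1, hd2]
            have : m / 10 - 1 - 1 = m / 10 - 2 := by omega
            rw [this]
          have hgq1 : gN (m / 10 - 1) = cN (m / 10 - 1) := IH _ (by omega)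
          have hgq2 : gN (m / 10 - 2) = cN (m / 10 - 2) := IH _ (by omega)
          have hcq : cN (m / 10 - 1) = cN (m / 10 - 2) +
              (if nzN (m / 10 - 1) then 1 else 0) := by
            have : m / 10 - 1 = (m / 10 - 2) + 1 := by omega
            rw [this]; rfl
          have hg1 : gN (m - 1) = cN (m - 1) := IH _ (by omega)
          rw [hnzm] at hcN
          simp only [Bool.false_eq_true, if_false, Nat.add_zero] at hcN
          by_cases hz : nzN (m / 10 - 1) = true <;>
            simp only [hz, Bool.false_eq_true, if_true, if_false] at e2 hcq <;> omega
      · -- last digit nonzero: the count moves by [nzN m]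
        have hm11 : 11 ≤ m := by omega
        have hd1 : (m - 1) / 10 = m / 10 := by omega
        have hd2 : (m - 1) % 10 = m % 10 - 1 := by omega
        have hnzm : nzN m = nzN (m / 10) := by
          rw [nzN_step m h0]; simp [hr]
        have e1 : gN m = 9 + 9 * gN (m / 10 - 1) +
            (if nzN (m / 10) then m % 10 else 0) := by
          rw [gN, if_neg h9]
        have e2 : gN (m - 1) = 9 + 9 * gN (m / 10 - 1) +
            (if nzN (m / 10) then m % 10 - 1 else 0) := by
          rw [gN, if_neg (by omega), hd1, hd2]
        have hg1 : gN (m - 1) = cN (m - 1) := IH _ (by omega)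
        rw [hnzm] at hcN
        have hr1 : 1 ≤ m % 10 := by omega
        by_cases hz : nzN (m / 10) = true <;>
          simp only [hz, Bool.false_eq_true, if_true, if_false] at e1 e2 hcN <;> omega

theorem cN_mono {a b : Nat} (h : a ≤ b) : cN a ≤ cN b := by
  induction b with
  | zero => rw [Nat.le_zero.mp h]
  | succ b IHb =>
    rcases Nat.lt_or_ge a (b + 1) with hlt | hge
    · exact le_trans (IHb (by omega)) (by rw [cN_succ_sub]; omega)
    · have : a = b + 1 := by omega
      rw [this]

-- counting over a Python range is a difference of cN
theorem countP_pyRange (a : Nat) (ha : 1 ≤ a) : ∀ (b : Nat), a ≤ b + 1 →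
    ((PySem.List.pyRange (a : Int) ((b : Int) + 1) 1).countP (fun i => nzN i.toNat)) + cN (a - 1) = cN b := by
  intro b
  induction b with
  | zero =>
    intro hab
    have : a = 1 := by omega
    subst this
    rw [PySem.List.pyRange_one_eq_nil (by norm_num)]
    simp [cN]
  | succ b IHb =>
    intro hab
    rcases Nat.lt_or_ge (b + 1) a with hge | hlt
    · have : a = b + 2 := by omega
      subst this
      rw [show (((b + 1 : Nat) : Int) + 1) = ((b + 2 : Nat) : Int) by push_cast; ring]
      rw [PySem.List.pyRange_one_eq_nil (by push_cast; omega)]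
      simp
    · have hsplit : ((PySem.List.pyRange (a : Int) (((b+1 : Nat) : Int) + 1) 1)) =
          PySem.List.pyRange (a : Int) (((b : Nat) : Int) + 1) 1 ++ [((b : Nat) : Int) + 1] := by
        rw [show (((b + 1 : Nat) : Int) + 1) = (((b : Nat) : Int) + 1) + 1 by push_cast; ring]
        exact PySem.List.pyRange_one_succ_right (by omega)
      rw [hsplit, List.countP_append, List.countP_singleton]
      have hlast : ((((b : Nat) : Int) + 1).toNat) = b + 1 := by omega
      have hcb : cN (b + 1) = cN b + (if nzN (b + 1) then 1 else 0) := rfl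
      rw [hcb, ← IHb (by omega)]
      simp only [hlast]
      by_cases hz : nzN (b + 1) <;> simp [hz] <;> omega

-- len(str(n)) for n ≥ 1 is the number of decimal digits of n
theorem strlen_eq (m : Nat) (hm : m ≠ 0) :
    PySem.Str.len (PySem.Int.toStr (m : Int)) = ((Nat.digits 10 m).length : Int) := by
  rw [PySem.Str.len_eq, PySem.Int.toStr, String.toList_ofList, toChars_natCast m hm]
  simp

theorem neq_eq_cN (n : Int) (hn : 1 ≤ n) : neq n =
    ((cN n.toNat : Int) - (cN (10 ^ ((Nat.digits 10 n.toNat).length - 1) - 1) : Int)) := by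
  obtain ⟨m, rfl⟩ : ∃ m : Nat, n = (m : Int) := ⟨n.toNat, by omega⟩
  have hm : m ≠ 0 := by omega
  set D : Nat := (Nat.digits 10 m).length with hD
  have hD1 : 1 ≤ D := by
    have h1 := (Nat.digits_ne_nil_iff_ne_zero (b := 10)).mpr hm
    have := List.length_pos_iff.mpr h1
    omega
  set L : Nat := 10 ^ (D - 1) with hL
  have hL1 : 1 ≤ L := Nat.one_le_pow _ _ (by norm_num)
  have hLm : L ≤ m := (Nat.lt_digits_length_iff (by norm_num) m).mp (by omega)
  have hmD : m < 10 ^ D := Nat.lt_base_pow_length_digits (by norm_num)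
  show (PySem.List.pyRange ((10:Int) ^ ((PySem.Str.len (PySem.Int.toStr (m : Int))) - 1).toNat) ((m : Int) + 1) 1).foldl _ 0 = _
  have hlo : (10:Int) ^ ((PySem.Str.len (PySem.Int.toStr (m : Int))) - 1).toNat = (L : Int) := by
    rw [strlen_eq m hm, ← hD, show ((D : Int) - 1).toNat = D - 1 by omega, hL]
    push_cast
    rfl
  rw [hlo]
  have key : ∀ (acc : Int), ∀ i ∈ PySem.List.pyRange (L : Int) ((m : Int) + 1) 1,
      (if ((PySem.List.pyRange 0 (PySem.Str.len (PySem.Int.toStr (m : Int))) 1).foldl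
            (fun ml j =>
              ml * (match PySem.Str.pyGet? (PySem.Int.toStr i) j with
                    | none => 0
                    | some c => (PySem.Int.ofChars? [c]).getD 0)) 1) ≠ 0 then acc + 1 else acc)
      = (if nzN i.toNat then acc + 1 else acc) := by
    intro acc i hi
    obtain ⟨hiL, him⟩ := PySem.List.mem_pyRange_one.mp hi
    obtain ⟨j, rfl⟩ : ∃ j : Nat, i = (j : Int) := ⟨i.toNat, by omega⟩
    have hjL : L ≤ j := by exact_mod_cast hiL
    have hjm : j ≤ m := by omega
    have hj0 : j ≠ 0 := by omega
    have hjD : (Nat.digits 10 j).length = D := by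
      have h1 : D - 1 < (Nat.digits 10 j).length :=
        (Nat.lt_digits_length_iff (by norm_num) j).mpr hjL
      have h2 : (Nat.digits 10 j).length ≤ D :=
        (Nat.digits_length_le_iff (by norm_num) j).mpr (by omega)
      omega
    have hinner := inner_prod j hj0 D hjD
    rw [strlen_eq m hm, ← hD, hinner]
    have hiff : (((Nat.digits 10 j).prod : Int) ≠ 0) ↔ (nzN ((j : Int).toNat) = true) := by
      rw [show ((j : Int).toNat) = j by omega, nzN_iff, Int.natCast_ne_zero]
      exact not_congr List.prod_eq_zero_iff
    by_cases hz : nzN ((j : Int).toNat) = true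
    · rw [if_pos (hiff.mpr hz), if_pos hz]
    · rw [if_neg (fun hc => hz (hiff.mp hc)), if_neg hz]
  refine Eq.trans (PySem.List.foldl_congr_mem _ _
    (fun (r i : Int) => if nzN i.toNat then r + 1 else r) 0
    (fun acc i hi => key acc i hi)) ?_
  rw [PySem.List.foldl_count_if]
  have hcount := countP_pyRange L hL1 m (by omega)
  have hmono : cN (L - 1) ≤ cN m := cN_mono (by omega)
  rw [show ((m : Int)).toNat = m by omega, ← hD, ← hL]
  omega

-- ===== VERDICT (by name: the statement is the Claim_ definition above) =====
theorem neq_spec : Claim_equal_neq := by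
  intro n _
  show neq n = neq_alt n
  by_cases hn : n < 1
  · -- empty range: lo = 10^(len(str(n))-1) ≥ 1 > n
    rw [neq_alt, if_pos hn]
    show (PySem.List.pyRange _ (n + 1) 1).foldl _ 0 = 0
    have h1 : (1 : Int) ≤ (10:Int) ^ ((PySem.Str.len (PySem.Int.toStr n)) - 1).toNat :=
      one_le_pow₀ (by norm_num)
    rw [PySem.List.pyRange_one_eq_nil (le_trans (by omega : n + 1 ≤ 1) h1)]
    rfl
  · rw [not_lt] at hn
    obtain ⟨m, rfl⟩ : ∃ m : Nat, n = (m : Int) := ⟨n.toNat, by omega⟩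
    have hm : m ≠ 0 := by omega
    set D : Nat := (Nat.digits 10 m).length with hD
    have hD1 : 1 ≤ D := by
      have h1 := (Nat.digits_ne_nil_iff_ne_zero (b := 10)).mpr hm
      have := List.length_pos_iff.mpr h1
      omega
    set L : Nat := 10 ^ (D - 1) with hL
    have hL1 : 1 ≤ L := Nat.one_le_pow _ _ (by norm_num)
    rw [neq_eq_cN (m : Int) hn]
    rw [neq_alt, if_neg (by omega)]
    show _ = gB (m : Int) - gB ((10:Int) ^ ((PySem.Str.len (PySem.Int.toStr (m : Int))) - 1).toNat - 1)
    have hlo : (10:Int) ^ ((PySem.Str.len (PySem.Int.toStr (m : Int))) - 1).toNat = (L : Int) := by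
      rw [strlen_eq m hm, ← hD, show ((D : Int) - 1).toNat = D - 1 by omega, hL]
      push_cast
      rfl
    rw [hlo, show ((L : Int) - 1) = ((L - 1 : Nat) : Int) by omega,
      gB_natCast, gB_natCast, gN_eq_cN, gN_eq_cN]
    rw [show ((m : Int)).toNat = m by omega, ← hD, ← hL]
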